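-- pv_equiv track=rewrite | github.com/DDFsco/RythMice | src/analysis/split_dat_segments.py | segment_stems_for_session
-- ===== SOURCE A (Python) =====
-- from typing import Literal, Optional
--
-- SESSION_PATTERN: dict[int, list[int]] = {
--     1: [0, 2, 0, 7, 0, 2, 0, 7, 0, 2, 0, 7],
--     2: [0, 7, 0, 2, 0, 7, 0, 2, 0, 7, 0, 2],
-- }
--
-- def _normalize_subject_id(subject_id: str) -> str:
--     s = subject_id.strip()
--     if s.isdigit():
--         return s.zfill(3)
--     return s
--
-- def segment_stems_for_session(subject_id: str, session_id: int) -> list[str]: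
--     """Return eighteen output stems (no suffix), e.g. ``001_presilence2hz_1``, ``001_2hz_1``."""
--     if session_id not in SESSION_PATTERN:
--         raise ValueError(f"session_id must be 1 or 2, got {session_id}")
--     sub = _normalize_subject_id(subject_id)
--     pattern = SESSION_PATTERN[session_id]
--     count_2hz = 0
--     count_7hz = 0
--     idx_pre_silence_2hz = 0
--     idx_pre_silence_7hz = 0
--     stems: list[str] = []
--     for i, code in enumerate(pattern):
--         if code == 0:
--             following: Optional[int] = None
--             for j in range(i + 1, len(pattern)):
--                 if pattern[j] in (2, 7):
--                     following = pattern[j]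
--                     break
--             if following is None:
--                 raise ValueError(
--                     "Each silence block (0) must be followed by 2 or 7 later in the pattern."
--                 )
--             if following == 2:
--                 idx_pre_silence_2hz += 1
--                 k = idx_pre_silence_2hz
--                 hz_tag = "2hz"
--             else:
--                 idx_pre_silence_7hz += 1
--                 k = idx_pre_silence_7hz
--                 hz_tag = "7hz"
--             stems.append(f"{sub}_presilence{hz_tag}_{k}")
--             stems.append(f"{sub}_possilence{hz_tag}_{k}")
--         elif code == 2:
--             count_2hz += 1
--             stems.append(f"{sub}_2hz_{count_2hz}")
--         elif code == 7:
--             count_7hz += 1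
--             stems.append(f"{sub}_7hz_{count_7hz}")
--         else:
--             raise ValueError(f"Invalid pattern code {code!r} (expected 0, 2, or 7)")
--     if len(stems) != 18:
--         raise RuntimeError(f"Internal error: expected 18 stems, got {len(stems)}")
--     return stems
-- ===== SOURCE B (Python) =====
-- def _normalize_subject_id(subject_id: str) -> str:
--     s = subject_id.strip()
--     if s.isdigit():
--         return s.zfill(3)
--     return s
--
-- def segment_stems_for_session(subject_id: str, session_id: int) -> list[str]:
--     """Return eighteen output stems (no suffix), e.g. ``001_presilence2hz_1``."""
--     if session_id not in (1, 2):
--         raise ValueError(f"session_id must be 1 or 2, got {session_id}")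
--     sub = _normalize_subject_id(subject_id)
--     tags = ("2hz", "7hz") if session_id == 1 else ("7hz", "2hz")
--     stems: list[str] = []
--     for k in (1, 2, 3):
--         for tag in tags:
--             stems.append(f"{sub}_presilence{tag}_{k}")
--             stems.append(f"{sub}_possilence{tag}_{k}")
--             stems.append(f"{sub}_{tag}_{k}")
--     return stems
-- ===== Notes on version B (the rewrite author's own statement) =====
-- stated objective: simpler
-- what changed: B drops the pattern dict, the four counters and the inner forward scan for the next non-zero code, and instead emits the 18 stems directly from the fixed block structure: three repetitions of (presilence,possilence,freq) for the two tags, whose order is the only thing session_id decides.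
import Mathlib
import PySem

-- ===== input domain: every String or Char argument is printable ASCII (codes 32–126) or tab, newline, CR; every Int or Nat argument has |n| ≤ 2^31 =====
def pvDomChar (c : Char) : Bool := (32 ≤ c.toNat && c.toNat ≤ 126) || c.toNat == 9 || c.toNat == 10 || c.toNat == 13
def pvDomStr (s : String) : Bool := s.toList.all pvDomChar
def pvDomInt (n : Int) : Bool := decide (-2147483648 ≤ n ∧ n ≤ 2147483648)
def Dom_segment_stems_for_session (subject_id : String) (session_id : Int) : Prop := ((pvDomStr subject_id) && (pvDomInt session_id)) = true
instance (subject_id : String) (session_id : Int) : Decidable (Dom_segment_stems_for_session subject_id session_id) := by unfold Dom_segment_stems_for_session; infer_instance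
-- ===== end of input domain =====

-- B replaces the pattern dict, the four counters and the inner next-nonzero scan by directly
-- emitting three (presilence, possilence, freq) blocks per tag pair; objective: simpler.

-- ===== PORT A =====
def SESSION_PATTERN : PySem.Dict Int (List Int) :=
  PySem.Dict.ofList [(1, [0, 2, 0, 7, 0, 2, 0, 7, 0, 2, 0, 7]),
                     (2, [0, 7, 0, 2, 0, 7, 0, 2, 0, 7, 0, 2])]

def pvNormalizeSubjectId (subject_id : String) : String :=
  let s := PySem.Str.strip subject_id
  if PySem.Str.strIsdigit s then PySem.Str.zfill s 3 else s

-- inner 'for j in range(i+1, len(pattern))' scan with break; none = loop fell through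
def pvFollowingLoop (pattern : List Int) : List Int → Option Int
  | [] => none
  | j :: rest =>
    match PySem.List.pyGet? pattern j with
    | none => none  -- IndexError (unreachable: j comes from range(i+1, len(pattern)))
    | some v => if v = 2 ∨ v = 7 then some v else pvFollowingLoop pattern rest

-- the main 'for i, code in enumerate(pattern)' loop; state (count_2hz, count_7hz,
-- idx_pre_silence_2hz, idx_pre_silence_7hz, stems); a raise returns the stems so far
def pvMainLoop (sub : String) (pattern : List Int) :
    List (Int × Int) → Int → Int → Int → Int → List String → List String
  | [], _, _, _, _, stems => stems
  | (i, code) :: rest, c2, c7, p2, p7, stems =>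
    if code = 0 then
      match pvFollowingLoop pattern (PySem.List.pyRange (i + 1) (PySem.List.len pattern) 1) with
      | none => stems  -- ValueError (unreachable for the two stored patterns)
      | some f =>
        if f = 2 then
          pvMainLoop sub pattern rest c2 c7 (p2 + 1) p7
            (stems ++ [sub ++ "_presilence" ++ "2hz" ++ "_" ++ PySem.Int.toStr (p2 + 1),
                       sub ++ "_possilence" ++ "2hz" ++ "_" ++ PySem.Int.toStr (p2 + 1)])
        else
          pvMainLoop sub pattern rest c2 c7 p2 (p7 + 1)
            (stems ++ [sub ++ "_presilence" ++ "7hz" ++ "_" ++ PySem.Int.toStr (p7 + 1),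
                       sub ++ "_possilence" ++ "7hz" ++ "_" ++ PySem.Int.toStr (p7 + 1)])
    else if code = 2 then
      pvMainLoop sub pattern rest (c2 + 1) c7 p2 p7
        (stems ++ [sub ++ "_2hz" ++ "_" ++ PySem.Int.toStr (c2 + 1)])
    else if code = 7 then
      pvMainLoop sub pattern rest c2 (c7 + 1) p2 p7
        (stems ++ [sub ++ "_7hz" ++ "_" ++ PySem.Int.toStr (c7 + 1)])
    else stems  -- ValueError (invalid pattern code; unreachable)

def segment_stems_for_session (subject_id : String) (session_id : Int) : List String :=
  if SESSION_PATTERN.contains session_id = false then []  -- ValueError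
  else
    let sub := pvNormalizeSubjectId subject_id
    let pattern := SESSION_PATTERN.getD session_id []
    let stems := pvMainLoop sub pattern (PySem.List.enumerate pattern) 0 0 0 0 []
    if stems.length = 18 then stems else []  -- RuntimeError if not 18

-- ===== PORT B =====
def segment_stems_for_session_alt (subject_id : String) (session_id : Int) : List String :=
  if ¬ (session_id = 1 ∨ session_id = 2) then []  -- ValueError
  else
    let sub := pvNormalizeSubjectId subject_id
    let tags : List String := if session_id = 1 then ["2hz", "7hz"] else ["7hz", "2hz"]
    ([1, 2, 3] : List Int).flatMap fun k =>
      tags.flatMap fun tag =>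
        [sub ++ "_presilence" ++ tag ++ "_" ++ PySem.Int.toStr k,
         sub ++ "_possilence" ++ tag ++ "_" ++ PySem.Int.toStr k,
         sub ++ "_" ++ tag ++ "_" ++ PySem.Int.toStr k]

-- ===== PRECONDITION & SPEC =====
-- A raises ValueError unless session_id is 1 or 2; exactly those inputs are excluded.
def Pre_segment_stems_for_session (subject_id : String) (session_id : Int) : Prop :=
  session_id = 1 ∨ session_id = 2
instance (subject_id : String) (session_id : Int) : Decidable (Pre_segment_stems_for_session subject_id session_id) := by unfold Pre_segment_stems_for_session; infer_instance

def pvWitness_segment_stems_for_session : String × Int := ("7", 1)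

def Spec_segment_stems_for_session (subject_id : String) (session_id : Int) (out : List String) : Prop := out = segment_stems_for_session_alt subject_id session_id
instance (subject_id : String) (session_id : Int) (out : List String) : Decidable (Spec_segment_stems_for_session subject_id session_id out) := by unfold Spec_segment_stems_for_session; infer_instance

-- ===== CLAIM (what is proved, stated in full; the proofs are below) =====
def Claim_equal_segment_stems_for_session : Prop := ∀ (subject_id : String) (session_id : Int), Dom_segment_stems_for_session subject_id session_id → Pre_segment_stems_for_session subject_id session_id → Spec_segment_stems_for_session subject_id session_id (segment_stems_for_session subject_id session_id)

-- ===== LEMMAS AND PROOFS =====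
lemma pvToStr1 : PySem.Int.toStr 1 = "1" := rfl
lemma pvToStr2 : PySem.Int.toStr 2 = "2" := rfl
lemma pvToStr3 : PySem.Int.toStr 3 = "3" := rfl

lemma pvLoop1 (sub : String) :
    pvMainLoop sub [0, 2, 0, 7, 0, 2, 0, 7, 0, 2, 0, 7]
      (PySem.List.enumerate [0, 2, 0, 7, 0, 2, 0, 7, 0, 2, 0, 7]) 0 0 0 0 [] =
  [sub ++ "_presilence" ++ "2hz" ++ "_" ++ PySem.Int.toStr 1,
   sub ++ "_possilence" ++ "2hz" ++ "_" ++ PySem.Int.toStr 1,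
   sub ++ "_2hz" ++ "_" ++ PySem.Int.toStr 1,
   sub ++ "_presilence" ++ "7hz" ++ "_" ++ PySem.Int.toStr 1,
   sub ++ "_possilence" ++ "7hz" ++ "_" ++ PySem.Int.toStr 1,
   sub ++ "_7hz" ++ "_" ++ PySem.Int.toStr 1,
   sub ++ "_presilence" ++ "2hz" ++ "_" ++ PySem.Int.toStr 2,
   sub ++ "_possilence" ++ "2hz" ++ "_" ++ PySem.Int.toStr 2,
   sub ++ "_2hz" ++ "_" ++ PySem.Int.toStr 2,
   sub ++ "_presilence" ++ "7hz" ++ "_" ++ PySem.Int.toStr 2,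
   sub ++ "_possilence" ++ "7hz" ++ "_" ++ PySem.Int.toStr 2,
   sub ++ "_7hz" ++ "_" ++ PySem.Int.toStr 2,
   sub ++ "_presilence" ++ "2hz" ++ "_" ++ PySem.Int.toStr 3,
   sub ++ "_possilence" ++ "2hz" ++ "_" ++ PySem.Int.toStr 3,
   sub ++ "_2hz" ++ "_" ++ PySem.Int.toStr 3,
   sub ++ "_presilence" ++ "7hz" ++ "_" ++ PySem.Int.toStr 3,
   sub ++ "_possilence" ++ "7hz" ++ "_" ++ PySem.Int.toStr 3,
   sub ++ "_7hz" ++ "_" ++ PySem.Int.toStr 3] := rfl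

lemma pvLoop2 (sub : String) :
    pvMainLoop sub [0, 7, 0, 2, 0, 7, 0, 2, 0, 7, 0, 2]
      (PySem.List.enumerate [0, 7, 0, 2, 0, 7, 0, 2, 0, 7, 0, 2]) 0 0 0 0 [] =
  [sub ++ "_presilence" ++ "7hz" ++ "_" ++ PySem.Int.toStr 1,
   sub ++ "_possilence" ++ "7hz" ++ "_" ++ PySem.Int.toStr 1,
   sub ++ "_7hz" ++ "_" ++ PySem.Int.toStr 1,
   sub ++ "_presilence" ++ "2hz" ++ "_" ++ PySem.Int.toStr 1,
   sub ++ "_possilence" ++ "2hz" ++ "_" ++ PySem.Int.toStr 1,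
   sub ++ "_2hz" ++ "_" ++ PySem.Int.toStr 1,
   sub ++ "_presilence" ++ "7hz" ++ "_" ++ PySem.Int.toStr 2,
   sub ++ "_possilence" ++ "7hz" ++ "_" ++ PySem.Int.toStr 2,
   sub ++ "_7hz" ++ "_" ++ PySem.Int.toStr 2,
   sub ++ "_presilence" ++ "2hz" ++ "_" ++ PySem.Int.toStr 2,
   sub ++ "_possilence" ++ "2hz" ++ "_" ++ PySem.Int.toStr 2,
   sub ++ "_2hz" ++ "_" ++ PySem.Int.toStr 2,
   sub ++ "_presilence" ++ "7hz" ++ "_" ++ PySem.Int.toStr 3,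
   sub ++ "_possilence" ++ "7hz" ++ "_" ++ PySem.Int.toStr 3,
   sub ++ "_7hz" ++ "_" ++ PySem.Int.toStr 3,
   sub ++ "_presilence" ++ "2hz" ++ "_" ++ PySem.Int.toStr 3,
   sub ++ "_possilence" ++ "2hz" ++ "_" ++ PySem.Int.toStr 3,
   sub ++ "_2hz" ++ "_" ++ PySem.Int.toStr 3] := rfl

lemma pvContains1 : SESSION_PATTERN.contains 1 = true := rfl
lemma pvContains2 : SESSION_PATTERN.contains 2 = true := rfl
lemma pvGetD1 : SESSION_PATTERN.getD 1 [] = [0, 2, 0, 7, 0, 2, 0, 7, 0, 2, 0, 7] := rfl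
lemma pvGetD2 : SESSION_PATTERN.getD 2 [] = [0, 7, 0, 2, 0, 7, 0, 2, 0, 7, 0, 2] := rfl


-- ===== VERDICT (by name: the statement is the Claim_ definition above) =====
set_option maxHeartbeats 1000000 in
theorem segment_stems_for_session_spec : Claim_equal_segment_stems_for_session := by
  intro subject_id session_id _ hpre
  unfold Spec_segment_stems_for_session
  rcases hpre with h | h <;> subst h <;>
    simp only [segment_stems_for_session, segment_stems_for_session_alt,
      pvContains1, pvContains2, pvGetD1, pvGetD2, pvLoop1, pvLoop2] <;>
    simp [pvToStr1, pvToStr2, pvToStr3, String.append_assoc]
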